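-- pv_equiv track=rewrite | github.com/StyLishPoor/python-practice | 3.py | choose_suit
-- ===== SOURCE A (Python) =====
-- def choose_suit(card):
--     suit_list = ([],[],[],[])
--     for i,c in enumerate(card):
--         if(c[-1] == 'C'):
--             suit_list[0].append(i)
--         elif(c[-1] == 'D'):
--             suit_list[1].append(i)
--         elif(c[-1] == 'H'):
--             suit_list[2].append(i)
--         else:
--             suit_list[3].append(i)
--     for c in suit_list:
--         if(len(c) >= 2):
--             return card[c[0]],card[c[1]]
-- ===== SOURCE B (Python) =====
-- def _first_two(card, pred):
--     first = None
--     for c in card: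
--         if pred(c):
--             if first is None:
--                 first = c
--             else:
--                 return first, c
--     return None
--
-- def choose_suit(card):
--     for pred in (lambda c: c[-1] == 'C',
--                  lambda c: c[-1] == 'D',
--                  lambda c: c[-1] == 'H',
--                  lambda c: c[-1] not in 'CDH'):
--         pair = _first_two(card, pred)
--         if pair is not None:
--             return pair
--     return None
-- ===== Notes on version B (the rewrite author's own statement) =====
-- stated objective: alternative
-- what changed: A makes one pass bucketing every card index into four suit lists and then inspects the buckets; B builds nothing: for each suit predicate in priority order it re-scans the card list with an early-exiting two-match finder and returns the first pair it yields.
-- outside the precondition, e.g. on choose_suit(['', 'AC']): A raises IndexError, B raises IndexError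
import Mathlib
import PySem

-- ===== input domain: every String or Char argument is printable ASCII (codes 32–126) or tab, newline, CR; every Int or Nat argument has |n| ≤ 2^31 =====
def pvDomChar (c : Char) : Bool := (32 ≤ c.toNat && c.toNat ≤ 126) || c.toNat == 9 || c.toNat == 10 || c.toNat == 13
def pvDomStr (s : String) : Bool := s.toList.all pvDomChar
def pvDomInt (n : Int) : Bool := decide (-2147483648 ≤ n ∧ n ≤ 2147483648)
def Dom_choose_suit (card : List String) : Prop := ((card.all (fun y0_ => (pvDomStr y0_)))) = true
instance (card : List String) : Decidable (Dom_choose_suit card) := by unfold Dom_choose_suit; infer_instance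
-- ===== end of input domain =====

-- B replaces A's four index buckets by per-suit rescans with an early-exiting two-match finder (alternative; same cost).

-- ===== PORT A =====
-- A's loop body (the four-way append on the tuple of index buckets), named so lemmas can speak about it.
def stepA (s : List Int × List Int × List Int × List Int) (ic : Int × String) :
    List Int × List Int × List Int × List Int :=
  if PySem.Str.pyGet? ic.2 (-1) = some 'C' then (s.1 ++ [ic.1], s.2.1, s.2.2.1, s.2.2.2)
  else if PySem.Str.pyGet? ic.2 (-1) = some 'D' then (s.1, s.2.1 ++ [ic.1], s.2.2.1, s.2.2.2)
  else if PySem.Str.pyGet? ic.2 (-1) = some 'H' then (s.1, s.2.1, s.2.2.1 ++ [ic.1], s.2.2.2)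
  else (s.1, s.2.1, s.2.2.1, s.2.2.2 ++ [ic.1])

-- A's second loop: first bucket with ≥ 2 indices; card[c[0]], card[c[1]] is exact via pyGetD since
-- those indices come from enumerate(card) and are in range.
def pickA (card : List String) : List (List Int) → Option (String × String)
  | [] => none
  | c :: rest =>
    if 2 ≤ c.length then
      some (PySem.List.pyGetD card (c.getD 0 0) "", PySem.List.pyGetD card (c.getD 1 0) "")
    else pickA card rest

def choose_suit (card : List String) : Option (String × String) :=
  let sl := (PySem.List.enumerate card).foldl stepA ([], [], [], [])
  pickA card [sl.1, sl.2.1, sl.2.2.1, sl.2.2.2]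

-- ===== PORT B =====
-- the four suit predicates, in A's priority order; the last one ports "c[-1] not in 'CDH'",
-- exact as a three-way char comparison since c[-1] is a single character.
def predC (c : String) : Bool := PySem.Str.pyGet? c (-1) == some 'C'
def predD (c : String) : Bool := PySem.Str.pyGet? c (-1) == some 'D'
def predH (c : String) : Bool := PySem.Str.pyGet? c (-1) == some 'H'
def predO (c : String) : Bool :=
  !(PySem.Str.pyGet? c (-1) == some 'C' || PySem.Str.pyGet? c (-1) == some 'D'
      || PySem.Str.pyGet? c (-1) == some 'H')

-- _first_two: one scan, remembering the first match, returning on the second.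
def firstTwo (p : String → Bool) (first : Option String) : List String → Option (String × String)
  | [] => none
  | c :: rest =>
    if p c then
      match first with
      | none => firstTwo p (some c) rest
      | some f => some (f, c)
    else firstTwo p first rest

-- the outer loop over the predicate tuple, with its early return.
def tryPreds (card : List String) : List (String → Bool) → Option (String × String)
  | [] => none
  | p :: ps =>
    match firstTwo p none card with
    | some r => some r
    | none => tryPreds card ps

def choose_suit_alt (card : List String) : Option (String × String) :=
  tryPreds card [predC, predD, predH, predO]

-- ===== PRECONDITION & SPEC =====
-- Pre_ excludes cards containing the empty string, on which Python A raises IndexError at c[-1].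
def Pre_choose_suit (card : List String) : Prop := ∀ c ∈ card, c ≠ ""
instance (card : List String) : Decidable (Pre_choose_suit card) := by
  unfold Pre_choose_suit; infer_instance

def pvWitness_choose_suit : List String := ["AC", "2C", "3D"]

def Spec_choose_suit (card : List String) (out : Option (String × String)) : Prop := out = choose_suit_alt card
instance (card : List String) (out : Option (String × String)) : Decidable (Spec_choose_suit card out) := by unfold Spec_choose_suit; infer_instance

-- ===== CLAIM (what is proved, stated in full; the proofs are below) =====
def Claim_equal_choose_suit : Prop := ∀ (card : List String), Dom_choose_suit card → Pre_choose_suit card → Spec_choose_suit card (choose_suit card)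

-- ===== LEMMAS AND PROOFS =====

-- proof-only classifier mirroring A's four-way branch
def grp (c : String) : Int :=
  if PySem.Str.pyGet? c (-1) = some 'C' then 0
  else if PySem.Str.pyGet? c (-1) = some 'D' then 1
  else if PySem.Str.pyGet? c (-1) = some 'H' then 2
  else 3

-- filtered cards of group g
def Fg (card : List String) (g : Int) : List String := card.filter (fun c => grp c == g)
-- indices (in enumerate order) whose card has group g
def Jf (g : Int) (l : List (Int × String)) : List Int :=
  (l.filter (fun p => grp p.2 == g)).map (·.1)

theorem foldA (l : List (Int × String)) (s : List Int × List Int × List Int × List Int) :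
    l.foldl stepA s =
      (s.1 ++ Jf 0 l, s.2.1 ++ Jf 1 l, s.2.2.1 ++ Jf 2 l, s.2.2.2 ++ Jf 3 l) := by
  induction l generalizing s with
  | nil => simp [Jf]
  | cons p t ih =>
    simp only [List.foldl_cons, ih, Jf, List.filter_cons]
    by_cases h1 : PySem.Str.pyGet? p.2 (-1) = some 'C' <;>
    by_cases h2 : PySem.Str.pyGet? p.2 (-1) = some 'D' <;>
    by_cases h3 : PySem.Str.pyGet? p.2 (-1) = some 'H' <;>
    simp_all [stepA, grp, PySem.Str.pyGet?]

theorem map_snd_filter_grp (g : Int) (l : List (Int × String)) :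
    (l.filter (fun p => grp p.2 == g)).map (fun p => p.2) =
    (l.map (fun p => p.2)).filter (fun c => grp c == g) := by
  induction l with
  | nil => simp
  | cons p t ih => by_cases h : grp p.2 == g <;> simp [h, ih]

theorem Jf_map_get (card : List String) (g : Int) :
    (Jf g (PySem.List.enumerate card 0)).map (fun i => PySem.List.pyGetD card i "") = Fg card g := by
  unfold Jf Fg
  rw [List.map_map]
  have hmem : ∀ p ∈ (PySem.List.enumerate card 0).filter (fun p => grp p.2 == g),
      ((fun i => PySem.List.pyGetD card i "") ∘ (·.1)) p = p.2 := by
    intro p hp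
    have hp' := List.mem_of_mem_filter hp
    rw [PySem.List.mem_enumerate_iff] at hp'
    obtain ⟨k, hk, rfl⟩ := hp'
    simp [PySem.List.pyGetD_natCast, List.getD_eq_getElem?_getD, hk]
  rw [List.map_congr_left hmem, map_snd_filter_grp, PySem.List.map_snd_enumerate]

theorem Jf_length (card : List String) (g : Int) :
    (Jf g (PySem.List.enumerate card 0)).length = (Fg card g).length := by
  rw [← Jf_map_get card g, List.length_map]

-- first two elements of a list as an Option pair (proof-side view of B's scanner)
def two? (G : List String) : Option (String × String) :=
  match G with
  | a :: b :: _ => some (a, b)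
  | _ => none

-- the predicates coincide with grp-classification
theorem predC_grp (c : String) : predC c = (grp c == 0) := by
  unfold predC grp
  by_cases h1 : PySem.Str.pyGet? c (-1) = some 'C' <;>
  by_cases h2 : PySem.Str.pyGet? c (-1) = some 'D' <;>
  by_cases h3 : PySem.Str.pyGet? c (-1) = some 'H' <;>
  simp_all [PySem.Str.pyGet?]
theorem predD_grp (c : String) : predD c = (grp c == 1) := by
  unfold predD grp
  by_cases h1 : PySem.Str.pyGet? c (-1) = some 'C' <;>
  by_cases h2 : PySem.Str.pyGet? c (-1) = some 'D' <;>
  by_cases h3 : PySem.Str.pyGet? c (-1) = some 'H' <;>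
  simp_all [PySem.Str.pyGet?]
theorem predH_grp (c : String) : predH c = (grp c == 2) := by
  unfold predH grp
  by_cases h1 : PySem.Str.pyGet? c (-1) = some 'C' <;>
  by_cases h2 : PySem.Str.pyGet? c (-1) = some 'D' <;>
  by_cases h3 : PySem.Str.pyGet? c (-1) = some 'H' <;>
  simp_all [PySem.Str.pyGet?]
theorem predO_grp (c : String) : predO c = (grp c == 3) := by
  unfold predO grp
  by_cases h1 : PySem.Str.pyGet? c (-1) = some 'C' <;>
  by_cases h2 : PySem.Str.pyGet? c (-1) = some 'D' <;>
  by_cases h3 : PySem.Str.pyGet? c (-1) = some 'H' <;>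
  simp_all [PySem.Str.pyGet?]

theorem filter_predC (card : List String) : card.filter predC = Fg card 0 := by
  unfold Fg; exact List.filter_congr (fun c _ => predC_grp c)
theorem filter_predD (card : List String) : card.filter predD = Fg card 1 := by
  unfold Fg; exact List.filter_congr (fun c _ => predD_grp c)
theorem filter_predH (card : List String) : card.filter predH = Fg card 2 := by
  unfold Fg; exact List.filter_congr (fun c _ => predH_grp c)
theorem filter_predO (card : List String) : card.filter predO = Fg card 3 := by
  unfold Fg; exact List.filter_congr (fun c _ => predO_grp c)

-- characterisation of the early-exit scanner: it yields the first two filtered elements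
theorem ft_some (p : String → Bool) (l : List String) (f : String) :
    firstTwo p (some f) l = match l.filter p with
      | b :: _ => some (f, b)
      | [] => none := by
  induction l with
  | nil => rfl
  | cons c t ih => by_cases hc : p c <;> simp [firstTwo, hc, ih]

theorem ftEq (p : String → Bool) (l : List String) :
    firstTwo p none l = two? (l.filter p) := by
  induction l with
  | nil => rfl
  | cons c t ih =>
    by_cases hc : p c
    · simp only [firstTwo, hc, ite_true, ft_some, List.filter_cons]
      cases t.filter p <;> rfl
    · simp [firstTwo, hc, ih]

theorem match_two (G : List String) (h : 2 ≤ G.length) :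
    two? G = some (PySem.List.pyGetD G 0 "", PySem.List.pyGetD G 1 "") := by
  match G, h with
  | a :: b :: t, _ => simp [two?, PySem.List.pyGetD_ofNat' (a :: b :: t) 0 "",
      PySem.List.pyGetD_ofNat' (a :: b :: t) 1 "", List.getD]

theorem match_none (G : List String) (h : G.length < 2) : two? G = none := by
  match G, h with
  | [], _ => rfl
  | [a], _ => rfl

-- picking card[b[0]], card[b[1]] from an index bucket b gives the first two filtered cards
theorem pick01 (card : List String) (b : List Int) (G : List String)
    (hmap : b.map (fun i => PySem.List.pyGetD card i "") = G) (h : 2 ≤ G.length) :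
    PySem.List.pyGetD card (b.getD 0 0) "" = PySem.List.pyGetD G 0 "" ∧
    PySem.List.pyGetD card (b.getD 1 0) "" = PySem.List.pyGetD G 1 "" := by
  have hlen : G.length = b.length := by rw [← hmap, List.length_map]
  have h0 : 0 < b.length := by omega
  have h1 : 1 < b.length := by omega
  have e0 : G[0]? = some (PySem.List.pyGetD card (b[0]'h0) "") := by
    rw [← hmap]; simp [List.getElem?_eq_getElem h0]
  have e1 : G[1]? = some (PySem.List.pyGetD card (b[1]'h1) "") := by
    rw [← hmap]; simp [List.getElem?_eq_getElem h1]
  constructor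
  · rw [List.getD_eq_getElem?_getD, List.getElem?_eq_getElem h0, Option.getD_some,
        PySem.List.pyGetD_ofNat' G 0 "", List.getD_eq_getElem?_getD, e0, Option.getD_some]
  · rw [List.getD_eq_getElem?_getD, List.getElem?_eq_getElem h1, Option.getD_some,
        PySem.List.pyGetD_ofNat' G 1 "", List.getD_eq_getElem?_getD, e1, Option.getD_some]

-- one bucket of A's second loop, rewritten as B's per-suit result with a continuation
theorem bucketEq (card : List String) (g : Int) (r : Option (String × String)) :
    (if 2 ≤ (Jf g (PySem.List.enumerate card 0)).length
      then some (PySem.List.pyGetD card ((Jf g (PySem.List.enumerate card 0)).getD 0 0) "",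
                 PySem.List.pyGetD card ((Jf g (PySem.List.enumerate card 0)).getD 1 0) "")
      else r)
    = match two? (Fg card g) with
      | some x => some x
      | none => r := by
  by_cases h : 2 ≤ (Fg card g).length
  · rw [if_pos (by rw [Jf_length]; exact h), match_two _ h]
    obtain ⟨e0, e1⟩ := pick01 card _ _ (Jf_map_get card g) h
    rw [e0, e1]
  · rw [if_neg (by rw [Jf_length]; omega), match_none _ (by omega)]

theorem main_eq (card : List String) : choose_suit card = choose_suit_alt card := by
  unfold choose_suit choose_suit_alt
  simp only [foldA, List.nil_append, tryPreds, ftEq,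
    filter_predC, filter_predD, filter_predH, filter_predO, pickA, bucketEq]

-- ===== VERDICT (by name: the statement is the Claim_ definition above) =====
theorem choose_suit_spec : Claim_equal_choose_suit := by
  intro card _ _
  unfold Spec_choose_suit
  exact main_eq card
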